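-- pv_equiv track=rewrite | github.com/omkhairate/MetalPathtracer | visualize_intersections_plot.py | _build_arrays
-- ===== SOURCE A (Python) =====
-- from typing import Any, Dict, List, Tuple
--
-- def _build_arrays(frames: List[Dict[str, Any]]) -> Tuple[List[List[int]], List[List[int]]]:
--     """Return 2-D arrays for intersection counts and residency."""
--     if not frames:
--         return [], []
--     frame_count = len(frames)
--     max_prims = max(len(f.get("primitives", [])) for f in frames)
--     counts = [[0 for _ in range(frame_count)] for _ in range(max_prims)]
--     active = [[0 for _ in range(frame_count)] for _ in range(max_prims)]
--     for f_idx, frame in enumerate(frames):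
--         prims = frame.get("primitives", [])
--         for p_idx, prim in enumerate(prims):
--             counts[p_idx][f_idx] = prim.get("lastIntersection", 0)
--             active[p_idx][f_idx] = 1 if prim.get("active", True) else 0
--     return counts, active
-- ===== SOURCE B (Python) =====
-- from typing import Any, Dict, List, Tuple
--
-- def _build_arrays(frames: List[Dict[str, Any]]) -> Tuple[List[List[int]], List[List[int]]]:
--     """Column-major build: one zero-padded column per frame, then transpose with zip(*)."""
--     if not frames:
--         return [], []
--     prim_lists = [f.get("primitives", []) for f in frames]
--     max_prims = max(len(ps) for ps in prim_lists)
--     cols_c = [[p.get("lastIntersection", 0) for p in ps] + [0] * (max_prims - len(ps))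
--               for ps in prim_lists]
--     cols_a = [[1 if p.get("active", True) else 0 for p in ps] + [0] * (max_prims - len(ps))
--               for ps in prim_lists]
--     return [list(r) for r in zip(*cols_c)], [list(r) for r in zip(*cols_a)]
-- ===== Notes on version B (the rewrite author's own statement) =====
-- stated objective: alternative
-- what changed: Replaces A's scatter pass (preallocate zero matrices, then mutate counts[p][f]/active[p][f] while looping over frames) by a column-major staged build: one zero-padded column per frame is built frame-by-frame, and the matrices are obtained by transposing the column lists with zip(*); no matrix is preallocated, mutated or indexed.
import Mathlib
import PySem

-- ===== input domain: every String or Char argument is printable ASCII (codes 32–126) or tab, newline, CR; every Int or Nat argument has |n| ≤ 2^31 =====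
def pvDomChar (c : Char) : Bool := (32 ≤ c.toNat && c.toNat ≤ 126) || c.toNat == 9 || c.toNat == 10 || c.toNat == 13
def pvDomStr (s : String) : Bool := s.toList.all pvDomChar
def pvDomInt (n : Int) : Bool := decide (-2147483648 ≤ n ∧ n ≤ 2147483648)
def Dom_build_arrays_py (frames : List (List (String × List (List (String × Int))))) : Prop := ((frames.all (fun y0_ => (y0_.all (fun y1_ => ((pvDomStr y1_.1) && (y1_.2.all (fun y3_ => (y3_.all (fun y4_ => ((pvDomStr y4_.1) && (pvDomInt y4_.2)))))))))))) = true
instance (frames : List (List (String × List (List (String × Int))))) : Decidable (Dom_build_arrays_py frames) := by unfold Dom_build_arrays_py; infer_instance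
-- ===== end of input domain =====

-- B replaces A's scatter-into-preallocated-zero-matrices pass by a column-major staged build:
-- one zero-padded column per frame, then a transpose (objective: alternative decomposition, same cost).

-- ===== PORT A =====
-- shared dict-access helpers (both Pythons call .get identically)
-- frame.get("primitives", [])
def getPrims (frame : List (String × List (List (String × Int)))) : List (List (String × Int)) :=
  PySem.Dict.getD ⟨frame⟩ "primitives" []
-- prim.get("lastIntersection", 0)
def lastI (prim : List (String × Int)) : Int :=
  PySem.Dict.getD ⟨prim⟩ "lastIntersection" 0
-- 1 if prim.get("active", True) else 0  (int truthiness: nonzero is truthy; missing key defaults to True)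
def activeV (prim : List (String × Int)) : Int :=
  if (match PySem.Dict.get? ⟨prim⟩ "active" with
      | some v => decide (v ≠ 0)
      | none => true) then 1 else 0

def build_arrays_py (frames : List (List (String × List (List (String × Int))))) : List (List Int) × List (List Int) :=
  if frames = [] then ([], [])
  else
    let frame_count := frames.length
    -- max(len(f.get("primitives", [])) for f in frames); frames ≠ [] so the max exists
    let max_prims := ((PySem.List.max? (frames.map (fun f => (getPrims f).length)) (fun x => x)).getD 0)
    let counts := List.replicate max_prims (List.replicate frame_count (0 : Int))
    let active := List.replicate max_prims (List.replicate frame_count (0 : Int))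
    -- for f_idx, frame in enumerate(frames): for p_idx, prim in enumerate(prims): scatter writes
    -- (indices are always in range, so List.set/List.getD are exact for Python's item get/assignment)
    (frames.zipIdx).foldl
      (fun st fp =>
        let prims := getPrims fp.1
        (prims.zipIdx).foldl
          (fun st2 pp =>
            (st2.1.set pp.2 ((st2.1.getD pp.2 []).set fp.2 (lastI pp.1)),
             st2.2.set pp.2 ((st2.2.getD pp.2 []).set fp.2 (activeV pp.1)))) st)
      (counts, active)

-- ===== PORT B =====
-- one zero-padded column for one frame: [v(p) for p in ps] + [0]*(M-len(ps))
def pvCol (v : List (String × Int) → Int) (M : Nat) (ps : List (List (String × Int))) : List Int :=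
  ps.map v ++ List.replicate (M - ps.length) 0
-- Python's zip(*cols) row-tuples (rows stop when a column is exhausted); fuel-bounded recursion,
-- called with fuel = max_prims, the exact common column length, so the fuel is exactly the row count
def pvZipT : Nat → List (List Int) → List (List Int)
  | 0, _ => []
  | Nat.succ n, cols =>
    if cols.any List.isEmpty then []
    else cols.map (fun c => c.headD 0) :: pvZipT n (cols.map List.tail)

def build_arrays_py_alt (frames : List (List (String × List (List (String × Int))))) : List (List Int) × List (List Int) :=
  if frames = [] then ([], [])
  else
    let primLists := frames.map getPrims
    let max_prims := ((PySem.List.max? (primLists.map List.length) (fun x => x)).getD 0)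
    let colsC := primLists.map (pvCol lastI max_prims)
    let colsA := primLists.map (pvCol activeV max_prims)
    (pvZipT max_prims colsC, pvZipT max_prims colsA)

-- ===== PRECONDITION & SPEC =====
def Spec_build_arrays_py (frames : List (List (String × List (List (String × Int))))) (out : List (List Int) × List (List Int)) : Prop := out = build_arrays_py_alt frames
instance (frames : List (List (String × List (List (String × Int))))) (out : List (List Int) × List (List Int)) : Decidable (Spec_build_arrays_py frames out) := by unfold Spec_build_arrays_py; infer_instance

-- ===== CLAIM (what is proved, stated in full; the proofs are below) =====
def Claim_equal_build_arrays_py : Prop := ∀ (frames : List (List (String × List (List (String × Int))))), Dom_build_arrays_py frames → Spec_build_arrays_py frames (build_arrays_py frames)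

-- ===== LEMMAS AND PROOFS =====

/-- entry (p, g) of a matrix given as a list of rows (0 outside). -/
def pvEntry (st : List (List Int)) (p g : Nat) : Int := (st.getD p []).getD g 0

/-- A's inner loop: scatter the prims of one frame (column f) into the matrix. -/
def pvInner (v : List (String × Int) → Int) (f : Nat)
    (l : List (List (String × Int) × Nat)) (st : List (List Int)) : List (List Int) :=
  l.foldl (fun st2 pp => st2.set pp.2 ((st2.getD pp.2 []).set f (v pp.1))) st

/-- A's outer loop over enumerated frames, for one of the two matrices. -/
def pvOuter (v : List (String × Int) → Int)
    (l : List (List (String × List (List (String × Int))) × Nat)) (st : List (List Int)) : List (List Int) :=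
  l.foldl (fun st fp => pvInner v fp.2 ((getPrims fp.1).zipIdx) st) st

theorem pvGetD_set {a : Type} (d : a) (xs : List a) (i p : Nat) (r : a) :
    (xs.set i r).getD p d = if i = p ∧ i < xs.length then r else xs.getD p d := by
  simp only [List.getD_eq_getElem?_getD, List.getElem?_set]
  by_cases h1 : i = p
  · subst h1
    by_cases h2 : i < xs.length
    · simp [h2]
    · have hn : xs[i]? = none := List.getElem?_eq_none (by omega)
      rw [hn]
      simp [h2]
  · simp [h1]

theorem pvInner_len (v : List (String × Int) → Int) (f : Nat) :
    ∀ (l : List (List (String × Int) × Nat)) (st : List (List Int)),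
      (pvInner v f l st).length = st.length := by
  intro l
  induction l with
  | nil => intro st; rfl
  | cons pp t ih => intro st; simp only [pvInner, List.foldl_cons] at *; rw [ih]; simp

theorem pvInner_rowlen (v : List (String × Int) → Int) (f : Nat) :
    ∀ (l : List (List (String × Int) × Nat)) (st : List (List Int)) (p : Nat),
      ((pvInner v f l st).getD p []).length = (st.getD p []).length := by
  intro l
  induction l with
  | nil => intro st p; rfl
  | cons pp t ih =>
    intro st p
    simp only [pvInner, List.foldl_cons] at *
    rw [ih]
    rw [pvGetD_set]
    split_ifs with h
    · rw [List.length_set, h.1]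
    · rfl

theorem pvInner_entry (v : List (String × Int) → Int) (f : Nat) :
    ∀ (ps : List (List (String × Int))) (j : Nat) (st : List (List Int)),
      j + ps.length ≤ st.length →
      (∀ p, p < st.length → f < (st.getD p []).length) →
      ∀ p g, pvEntry (pvInner v f (ps.zipIdx j) st) p g =
        if j ≤ p ∧ p < j + ps.length ∧ g = f then v (ps.getD (p - j) []) else pvEntry st p g := by
  intro ps
  induction ps with
  | nil =>
    intro j st _ _ p g
    simp only [List.zipIdx_nil, pvInner, List.foldl_nil, List.length_nil]
    rw [if_neg (by omega)]
  | cons a t ih =>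
    intro j st hlen hrow p g
    rw [List.length_cons] at hlen
    have hjst : j < st.length := by omega
    set st' : List (List Int) := st.set j ((st.getD j []).set f (v a)) with hst'
    have hlen' : st'.length = st.length := by rw [hst', List.length_set]
    have h1 : (j + 1) + t.length ≤ st'.length := by omega
    have h2 : ∀ p, p < st'.length → f < (st'.getD p []).length := by
      intro q hq
      rw [hlen'] at hq
      rw [hst', pvGetD_set]
      split_ifs with h
      · rw [List.length_set]; exact hrow j hjst
      · exact hrow q hq
    simp only [List.zipIdx_cons, pvInner, List.foldl_cons]
    have hih := ih (j + 1) st' h1 h2 p g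
    rw [show (List.foldl (fun st2 pp => st2.set pp.2 ((st2.getD pp.2 []).set f (v pp.1)))
        st' (t.zipIdx (j + 1))) = pvInner v f (t.zipIdx (j + 1)) st' from rfl, hih]
    by_cases hmain : j + 1 ≤ p ∧ p < j + 1 + t.length ∧ g = f
    · rw [if_pos hmain, if_pos (by rw [List.length_cons]; omega)]
      have hpj : p - j = (p - (j + 1)) + 1 := by omega
      rw [hpj, List.getD_cons_succ]
    · rw [if_neg hmain]
      unfold pvEntry
      rw [hst', pvGetD_set]
      by_cases hpj : j = p
      · subst hpj
        rw [if_pos ⟨rfl, hjst⟩, pvGetD_set]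
        by_cases hgf : f = g
        · subst hgf
          rw [if_pos ⟨rfl, hrow j hjst⟩,
              if_pos (by refine ⟨le_refl j, ?_, rfl⟩; rw [List.length_cons]; omega), Nat.sub_self, List.getD_cons_zero]
        · rw [if_neg (by tauto), if_neg (by rw [List.length_cons]; omega)]
      · rw [if_neg (by tauto), if_neg (by rw [List.length_cons]; omega)]

theorem pvOuter_len (v : List (String × Int) → Int) :
    ∀ (l : List (List (String × List (List (String × Int))) × Nat)) (st : List (List Int)),
      (pvOuter v l st).length = st.length := by
  intro l
  induction l with
  | nil => intro st; rfl
  | cons fp t ih => intro st; simp only [pvOuter, List.foldl_cons] at *; rw [ih, pvInner_len]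

theorem pvOuter_rowlen (v : List (String × Int) → Int) :
    ∀ (l : List (List (String × List (List (String × Int))) × Nat)) (st : List (List Int)) (p : Nat),
      ((pvOuter v l st).getD p []).length = (st.getD p []).length := by
  intro l
  induction l with
  | nil => intro st p; rfl
  | cons fp t ih => intro st p; simp only [pvOuter, List.foldl_cons] at *; rw [ih, pvInner_rowlen]

theorem pvOuter_entry (v : List (String × Int) → Int) :
    ∀ (fl : List (List (String × List (List (String × Int))))) (j : Nat) (st : List (List Int)),
      (∀ fr ∈ fl, (getPrims fr).length ≤ st.length) →
      (∀ p, p < st.length → j + fl.length ≤ (st.getD p []).length) →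
      ∀ p g, pvEntry (pvOuter v (fl.zipIdx j) st) p g =
        if j ≤ g ∧ g < j + fl.length ∧ p < (getPrims (fl.getD (g - j) [])).length
        then v ((getPrims (fl.getD (g - j) [])).getD p [])
        else pvEntry st p g := by
  intro fl
  induction fl with
  | nil =>
    intro j st _ _ p g
    simp only [List.zipIdx_nil, pvOuter, List.foldl_nil, List.length_nil]
    rw [if_neg (by omega)]
  | cons fr t ih =>
    intro j st hprim hrow p g
    set st' : List (List Int) := pvInner v j ((getPrims fr).zipIdx) st with hst'
    have hlen' : st'.length = st.length := by rw [hst', pvInner_len]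
    have h1 : ∀ x ∈ t, (getPrims x).length ≤ st'.length := by
      intro x hx; rw [hlen']; exact hprim x (List.mem_cons_of_mem _ hx)
    have h2 : ∀ p, p < st'.length → (j + 1) + t.length ≤ (st'.getD p []).length := by
      intro q hq
      rw [hlen'] at hq
      rw [hst', pvInner_rowlen]
      have := hrow q hq
      rw [List.length_cons] at this
      omega
    simp only [List.zipIdx_cons, pvOuter, List.foldl_cons]
    have hih := ih (j + 1) st' h1 h2 p g
    rw [show (List.foldl (fun st fp => pvInner v fp.2 ((getPrims fp.1).zipIdx) st)
        st' (t.zipIdx (j + 1))) = pvOuter v (t.zipIdx (j + 1)) st' from rfl, hih]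
    have hinner := pvInner_entry v j (getPrims fr) 0 st
      (by simpa using hprim fr (List.mem_cons_self ..))
      (by intro q hq; have := hrow q hq; rw [List.length_cons] at this; omega) p g
    simp only [Nat.zero_add, Nat.zero_le, true_and, Nat.sub_zero] at hinner
    by_cases hmain : j + 1 ≤ g ∧ g < j + 1 + t.length ∧ p < (getPrims (t.getD (g - (j + 1)) [])).length
    · have heq : g - j = (g - (j + 1)) + 1 := by omega
      rw [if_pos hmain,
          if_pos (by refine ⟨by omega, by rw [List.length_cons]; omega, ?_⟩
                     rw [heq, List.getD_cons_succ]; exact hmain.2.2),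
          heq, List.getD_cons_succ]
    · rw [if_neg hmain, hst', hinner]
      by_cases hgj : g = j
      · subst hgj
        have heq0 : g - g = 0 := by omega
        by_cases hp : p < (getPrims fr).length
        · rw [if_pos ⟨hp, rfl⟩,
              if_pos (by refine ⟨le_refl g, by rw [List.length_cons]; omega, ?_⟩
                         rw [heq0, List.getD_cons_zero]; exact hp),
              heq0, List.getD_cons_zero]
        · rw [if_neg (by tauto),
              if_neg (by rw [heq0, List.getD_cons_zero]; intro h; exact hp h.2.2)]
      · rw [if_neg (by tauto),
            if_neg (by
              intro h
              have heq : g - j = (g - (j + 1)) + 1 := by omega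
              rw [heq, List.getD_cons_succ, List.length_cons] at h
              exact hmain ⟨by omega, by omega, h.2.2⟩)]

theorem pvEntry_replicate (M n p g : Nat) :
    pvEntry (List.replicate M (List.replicate n (0 : Int))) p g = 0 := by
  unfold pvEntry
  have h1 : (List.replicate M (List.replicate n (0 : Int))).getD p [] =
      if p < M then List.replicate n 0 else [] := by
    by_cases hp : p < M
    · rw [if_pos hp, List.getD_eq_getElem?_getD, List.getElem?_replicate_of_lt hp]
      rfl
    · rw [if_neg hp, List.getD_eq_getElem?_getD, List.getElem?_eq_none (by rw [List.length_replicate]; omega)]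
      rfl
  rw [h1]
  split_ifs with hp
  · rcases Nat.lt_or_ge g n with hg | hg
    · rw [List.getD_eq_getElem?_getD, List.getElem?_replicate_of_lt hg]
      rfl
    · rw [List.getD_eq_getElem?_getD, List.getElem?_eq_none (by rw [List.length_replicate]; omega)]
      rfl
  · rfl

theorem pvOuter_grid (v : List (String × Int) → Int)
    (frames : List (List (String × List (List (String × Int))))) (M : Nat)
    (hM : ∀ fr ∈ frames, (getPrims fr).length ≤ M) :
    pvOuter v frames.zipIdx (List.replicate M (List.replicate frames.length (0 : Int))) =
      (List.range M).map (fun p => (List.range frames.length).map (fun g =>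
        if p < ((frames.map getPrims).getD g []).length
        then v (((frames.map getPrims).getD g []).getD p []) else 0)) := by
  set n := frames.length with hn
  set st0 : List (List Int) := List.replicate M (List.replicate n 0) with hst0
  have hlen : (pvOuter v frames.zipIdx st0).length = M := by
    rw [pvOuter_len, hst0, List.length_replicate]
  have hrowst0 : ∀ p, p < M → st0.getD p [] = List.replicate n 0 := by
    intro p hp
    rw [hst0, List.getD_eq_getElem?_getD, List.getElem?_replicate_of_lt hp]
    rfl
  have hentry := pvOuter_entry v frames 0 st0
    (by intro fr hfr; rw [hst0, List.length_replicate]; exact hM fr hfr)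
    (by intro p hp
        rw [hst0, List.length_replicate] at hp
        rw [hrowst0 p hp, List.length_replicate]
        omega)
  have hrowlen : ∀ p, p < M → ((pvOuter v frames.zipIdx st0).getD p []).length = n := by
    intro p hp
    rw [pvOuter_rowlen, hrowst0 p hp, List.length_replicate]
  apply List.ext_getElem
  · rw [hlen, List.length_map, List.length_range]
  · intro p hp hp'
    rw [List.getElem_map, List.getElem_range]
    have hpM : p < M := by rwa [hlen] at hp
    apply List.ext_getElem
    · have := hrowlen p hpM
      rw [List.getD_eq_getElem?_getD, List.getElem?_eq_getElem hp] at this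
      simpa using this
    · intro g hg hg'
      rw [List.length_map, List.length_range] at hg'
      rw [List.getElem_map, List.getElem_range]
      have hcell : (pvOuter v frames.zipIdx st0)[p][g] = pvEntry (pvOuter v frames.zipIdx st0) p g := by
        have hrow : (pvOuter v frames.zipIdx st0).getD p [] = (pvOuter v frames.zipIdx st0)[p] := by
          rw [List.getD_eq_getElem?_getD, List.getElem?_eq_getElem hp]
          rfl
        unfold pvEntry
        rw [hrow, List.getD_eq_getElem?_getD, List.getElem?_eq_getElem hg]
        rfl
      have hgn : g < frames.length := by omega
      have h2 : frames.getD g [] = frames[g] := by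
        rw [List.getD_eq_getElem?_getD, List.getElem?_eq_getElem hgn]
        rfl
      have h1 : (frames.map getPrims).getD g [] = getPrims frames[g] := by
        rw [List.getD_eq_getElem?_getD, List.getElem?_map, List.getElem?_eq_getElem hgn]
        rfl
      rw [hcell, hentry p g, Nat.sub_zero, h2, h1]
      by_cases hy : p < (getPrims frames[g]).length
      · rw [if_pos ⟨Nat.zero_le g, by omega, hy⟩, if_pos hy]
      · rw [if_neg (fun h => hy h.2.2), if_neg hy]
        exact pvEntry_replicate M n p g

-- B-side lemmas: the transpose of columns, cell by cell

theorem pvGetD_succ_tail (c : List Int) (p : Nat) :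
    c.getD (p + 1) 0 = c.tail.getD p 0 := by
  cases c <;> rfl

theorem pvGetD_zero_head (c : List Int) : c.getD 0 0 = c.headD 0 := by
  cases c <;> rfl

theorem pvZipT_eq (M : Nat) :
    ∀ (cols : List (List Int)), cols ≠ [] → (∀ c ∈ cols, M ≤ c.length) →
      pvZipT M cols = (List.range M).map (fun p => cols.map (fun c => c.getD p 0)) := by
  induction M with
  | zero => intro cols _ _; rfl
  | succ n ih =>
    intro cols hne hlen
    have hany : cols.any List.isEmpty = false := by
      rw [List.any_eq_false]
      intro c hc
      have := hlen c hc
      cases c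
      · simp at this
      · simp
    rw [pvZipT, if_neg (by rw [hany]; exact Bool.false_ne_true)]
    have hne' : cols.map List.tail ≠ [] := by
      intro h; exact hne (List.map_eq_nil_iff.mp h)
    have hlen' : ∀ c ∈ cols.map List.tail, n ≤ c.length := by
      intro c hc
      obtain ⟨c0, hc0, rfl⟩ := List.mem_map.mp hc
      have := hlen c0 hc0
      rw [List.length_tail]
      omega
    rw [ih (cols.map List.tail) hne' hlen', List.range_succ_eq_map, List.map_cons, List.map_map]
    congr 1
    · exact List.map_congr_left (fun c _ => (pvGetD_zero_head c).symm)
    · apply List.map_congr_left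
      intro p _
      simp only [Function.comp_apply]
      rw [List.map_map]
      exact List.map_congr_left (fun c _ => (pvGetD_succ_tail c p).symm)

theorem pvCol_cell (v : List (String × Int) → Int) (M : Nat)
    (ps : List (List (String × Int))) (p : Nat) :
    (pvCol v M ps).getD p 0 = if p < ps.length then v (ps.getD p []) else 0 := by
  unfold pvCol
  by_cases hp : p < ps.length
  · rw [if_pos hp, List.getD_eq_getElem?_getD, List.getElem?_append_left (by simpa using hp),
        List.getElem?_map, List.getElem?_eq_getElem hp]
    simp [List.getD_eq_getElem?_getD, List.getElem?_eq_getElem hp]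
  · rw [if_neg hp, List.getD_eq_getElem?_getD,
        List.getElem?_append_right (by simpa using Nat.le_of_not_lt hp)]
    simp only [List.length_map]
    rcases Nat.lt_or_ge (p - ps.length) (M - ps.length) with h | h
    · rw [List.getElem?_replicate_of_lt h]
      rfl
    · rw [List.getElem?_eq_none (by rw [List.length_replicate]; omega)]
      rfl

theorem pvAlt_grid (v : List (String × Int) → Int)
    (frames : List (List (String × List (List (String × Int))))) (M : Nat)
    (hne : frames ≠ [])
    (hM : ∀ fr ∈ frames, (getPrims fr).length ≤ M) :
    pvZipT M ((frames.map getPrims).map (pvCol v M)) =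
      (List.range M).map (fun p => (List.range frames.length).map (fun g =>
        if p < ((frames.map getPrims).getD g []).length
        then v (((frames.map getPrims).getD g []).getD p []) else 0)) := by
  have hne' : (frames.map getPrims).map (pvCol v M) ≠ [] := by
    intro h
    exact hne (List.map_eq_nil_iff.mp (List.map_eq_nil_iff.mp h))
  have hlen : ∀ c ∈ (frames.map getPrims).map (pvCol v M), M ≤ c.length := by
    intro c hc
    obtain ⟨ps, hps, rfl⟩ := List.mem_map.mp hc
    obtain ⟨fr, hfr, rfl⟩ := List.mem_map.mp hps
    unfold pvCol
    rw [List.length_append, List.length_map, List.length_replicate]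
    have := hM fr hfr
    omega
  rw [pvZipT_eq M _ hne' hlen]
  apply List.map_congr_left
  intro p _
  rw [List.map_map]
  apply List.ext_getElem
  · rw [List.length_map, List.length_map, List.length_map, List.length_range]
  · intro g hg hg'
    have hgn : g < frames.length := by
      rw [List.length_map, List.length_map] at hg
      exact hg
    have hgd : (frames.map getPrims).getD g [] = getPrims frames[g] := by
      rw [List.getD_eq_getElem?_getD, List.getElem?_map, List.getElem?_eq_getElem hgn]
      rfl
    simp only [List.getElem_map, List.getElem_range, Function.comp_apply, hgd, pvCol_cell]

-- ===== VERDICT (by name: the statement is the Claim_ definition above) =====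
theorem build_arrays_py_spec : Claim_equal_build_arrays_py := by
  intro frames _
  unfold Spec_build_arrays_py build_arrays_py build_arrays_py_alt
  by_cases hnil : frames = []
  · rw [if_pos hnil, if_pos hnil]
  · rw [if_neg hnil, if_neg hnil]
    dsimp only
    rw [List.map_map]
    simp only [Function.comp_def]
    have hM : ∀ fr ∈ frames, (getPrims fr).length ≤
        (PySem.List.max? (frames.map (fun f => (getPrims f).length)) (fun x => x)).getD 0 := by
      intro fr hfr
      cases hmx : PySem.List.max? (frames.map (fun f => (getPrims f).length)) (fun x => x) with
      | none =>
        exfalso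
        exact hnil (by simpa using (PySem.List.max?_eq_none_iff (xs := frames.map (fun f => (getPrims f).length)) (key := fun x => x)).mp hmx)
      | some m =>
        have := PySem.List.max?_isMax hmx ((getPrims fr).length) (List.mem_map_of_mem hfr)
        simpa using this
    have hsplit : ∀ (st : List (List Int) × List (List Int))
        (fp : List (String × List (List (String × Int))) × Nat),
        (List.foldl (fun st2 pp =>
            (st2.1.set pp.2 ((st2.1.getD pp.2 []).set fp.2 (lastI pp.1)),
             st2.2.set pp.2 ((st2.2.getD pp.2 []).set fp.2 (activeV pp.1))))
          st ((getPrims fp.1).zipIdx))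
        = (pvInner lastI fp.2 ((getPrims fp.1).zipIdx) st.1,
           pvInner activeV fp.2 ((getPrims fp.1).zipIdx) st.2) := by
      intro st fp
      obtain ⟨c, a⟩ := st
      exact PySem.List.foldl_prod_mk
        (f := fun (c : List (List Int)) (pp : List (String × Int) × Nat) => c.set pp.2 ((c.getD pp.2 []).set fp.2 (lastI pp.1)))
        (g := fun (a : List (List Int)) (pp : List (String × Int) × Nat) => a.set pp.2 ((a.getD pp.2 []).set fp.2 (activeV pp.1))) _ _ _
    have hA := PySem.List.foldl_congr_mem frames.zipIdx _ _
      (List.replicate ((PySem.List.max? (List.map (fun f => (getPrims f).length) frames) (fun x => x)).getD 0)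
          (List.replicate frames.length (0 : Int)),
       List.replicate ((PySem.List.max? (List.map (fun f => (getPrims f).length) frames) (fun x => x)).getD 0)
          (List.replicate frames.length (0 : Int)))
      (fun acc x _ => hsplit acc x)
    rw [hA]
    have hpair : ∀ (c0 a0 : List (List Int)),
        List.foldl (fun acc x => (pvInner lastI x.2 ((getPrims x.1).zipIdx) acc.1,
                                  pvInner activeV x.2 ((getPrims x.1).zipIdx) acc.2)) (c0, a0) frames.zipIdx
          = (pvOuter lastI frames.zipIdx c0, pvOuter activeV frames.zipIdx a0) := by
      intro c0 a0
      exact PySem.List.foldl_prod_mk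
        (fun (c : List (List Int)) fp => pvInner lastI fp.2 ((getPrims fp.1).zipIdx) c)
        (fun (a : List (List Int)) fp => pvInner activeV fp.2 ((getPrims fp.1).zipIdx) a)
        frames.zipIdx c0 a0
    rw [hpair]
    rw [pvOuter_grid lastI frames _ hM, pvOuter_grid activeV frames _ hM,
        ← pvAlt_grid lastI frames _ hnil hM, ← pvAlt_grid activeV frames _ hnil hM]
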